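-- pv_equiv track=rewrite | github.com/HoeYeon/Algorithm | Coding_Test/wooah_2019/6.py | solution
-- ===== SOURCE A (Python) =====
-- def solution(forms):
--     answer = []
--     name = [i[1] for i in forms]
--     dd = {}
--     for i in forms:
--         dd[i[1]] = i[0]
--     comb = []
--     for i in name:
--         tmp = [i[j:j+2] for j in range(len(i)-1)]
--         comb.append(tmp)
--     check2 = [0 for i in range(len(name))]
--     for i in range(len(name)):
--         if check2[i] == 1:
--             continue
--         for k in range(i+1,len(name)):
--             for j in comb[i]:
--                 if j in comb[k]:
--                     answer.append(dd[name[i]])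
--                     answer.append(dd[name[k]])
--                     check2[i] = 1
--                     check2[k] = 1
--     answer = sorted(list(set(answer)))
--     return answer
-- ===== SOURCE B (Python) =====
-- def solution(forms):
--     names = []
--     ids = {}
--     for f in forms:
--         names.append(f[1])
--         ids[f[1]] = f[0]
--     n = len(names)
--     bigs = []
--     index = {}
--     for i in range(n):
--         nm = names[i]
--         bs = [nm[j:j + 2] for j in range(len(nm) - 1)]
--         bigs.append(bs)
--         for b in bs:
--             index.setdefault(b, []).append(i)
--     marked = [False] * n
--     result = set()
--     for i in range(n):
--         if marked[i]:
--             continue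
--         matches = {k for b in bigs[i] for k in index[b] if k > i}
--         if matches:
--             result.add(ids[names[i]])
--             for k in matches:
--                 result.add(ids[names[k]])
--                 marked[k] = True
--     return sorted(result)
-- ===== Notes on version B (the rewrite author's own statement) =====
-- stated objective: alternative
-- what changed: Replaces A's all-pairs scan (for every pair i<k, test every bigram of name i against name k's bigram list) with a bigram->indices inverted index built in one pass; each unmarked name collects its later matches from the index in one set comprehension and marks them, and the deduplicated ids are sorted.
import Mathlib
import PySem

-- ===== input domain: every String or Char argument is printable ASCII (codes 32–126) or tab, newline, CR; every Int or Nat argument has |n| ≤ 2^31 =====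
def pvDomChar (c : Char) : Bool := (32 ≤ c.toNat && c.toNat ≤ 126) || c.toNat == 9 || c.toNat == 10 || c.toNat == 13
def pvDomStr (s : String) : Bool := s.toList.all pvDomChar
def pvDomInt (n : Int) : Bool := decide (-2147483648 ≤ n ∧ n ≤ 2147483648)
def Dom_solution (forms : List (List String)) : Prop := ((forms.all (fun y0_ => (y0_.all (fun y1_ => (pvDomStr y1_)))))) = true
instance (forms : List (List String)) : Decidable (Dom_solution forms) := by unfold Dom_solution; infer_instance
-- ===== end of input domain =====

-- B replaces A's quadratic all-pairs bigram scan by a bigram -> indices inverted index with the same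
-- sequential marking, then sorts the deduplicated ids; return values agree on Pre_ (forms with ≥ 2 fields).

-- ===== PORT A =====
-- dd[name[i]] / dd[name[k]] is ported as Dict.getD _ "": every looked-up name was inserted into dd,
-- so the default is never used and the port is exact.
def solution (forms : List (List String)) : List String :=
  let name : List String := forms.map (fun i => PySem.List.pyGetD i 1 "")
  let dd : PySem.Dict String String :=
    forms.foldl (fun d i => d.insert (PySem.List.pyGetD i 1 "") (PySem.List.pyGetD i 0 ""))
      PySem.Dict.empty
  let comb : List (List String) :=
    name.foldl (fun acc i =>
      acc ++ [(PySem.List.pyRange 0 (PySem.Str.len i - 1) 1).map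
                (fun j => PySem.Str.slice i (some j) (some (j + 2)))]) []
  let check2 : List Int := (PySem.List.pyRange 0 (name.length : Int) 1).map (fun _ => 0)
  let st : List String × List Int :=
    (PySem.List.pyRange 0 (name.length : Int) 1).foldl (fun st i =>
      if PySem.List.pyGetD st.2 i 0 = 1 then st
      else
        (PySem.List.pyRange (i + 1) (name.length : Int) 1).foldl (fun st k =>
          (PySem.List.pyGetD comb i []).foldl (fun (st : List String × List Int) j =>
            if (PySem.List.pyGetD comb k []).contains j then
              (st.1 ++ [dd.getD (PySem.List.pyGetD name i "") "",
                        dd.getD (PySem.List.pyGetD name k "") ""],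
               PySem.List.pySetD (PySem.List.pySetD st.2 i 1) k 1)
            else st) st) st)
      ([], check2)
  PySem.List.sorted (PySem.Set.ofList st.1) (fun x => x) false

-- ===== PORT B =====
-- ids[names[i]] and index[b] are ported with Dict.getD: the keys are always present, so the
-- defaults are never used and the port is exact.
def solution_alt (forms : List (List String)) : List String :=
  let st0 : List String × PySem.Dict String String :=
    forms.foldl (fun st f =>
      (st.1 ++ [PySem.List.pyGetD f 1 ""],
       st.2.insert (PySem.List.pyGetD f 1 "") (PySem.List.pyGetD f 0 "")))
      ([], PySem.Dict.empty)
  let names := st0.1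
  let ids := st0.2
  let n : Int := names.length
  let st1 : List (List String) × PySem.Dict String (List Int) :=
    (PySem.List.pyRange 0 n 1).foldl (fun st i =>
      (st.1 ++ [(PySem.List.pyRange 0 (PySem.Str.len (PySem.List.pyGetD names i "") - 1) 1).map
                  (fun j => PySem.Str.slice (PySem.List.pyGetD names i "") (some j) (some (j + 2)))],
       ((PySem.List.pyRange 0 (PySem.Str.len (PySem.List.pyGetD names i "") - 1) 1).map
                  (fun j => PySem.Str.slice (PySem.List.pyGetD names i "") (some j) (some (j + 2)))).foldl
         (fun d b => d.modify b [] (fun l => l ++ [i])) st.2))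
      ([], PySem.Dict.empty)
  let bigs := st1.1
  let index := st1.2
  let marked : List Bool := List.replicate n.toNat false
  let st : PySem.Set String × List Bool :=
    (PySem.List.pyRange 0 n 1).foldl (fun st i =>
      if PySem.List.pyGetD st.2 i false = true then st
      else
        let mset : PySem.Set Int :=
          (PySem.List.pyGetD bigs i []).foldl (fun m b =>
            (index.getD b []).foldl (fun m k => if i < k then PySem.Set.add m k else m) m)
            PySem.Set.empty
        if mset = [] then st
        else
          mset.foldl (fun st k =>
            (PySem.Set.add st.1 (ids.getD (PySem.List.pyGetD names k "") ""),
             PySem.List.pySetD st.2 k true))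
            (PySem.Set.add st.1 (ids.getD (PySem.List.pyGetD names i "") ""), st.2))
      (PySem.Set.empty, marked)
  PySem.List.sorted st.1 (fun x => x) false

-- ===== PRECONDITION & SPEC =====
-- A raises IndexError (i[1]) on any form with fewer than two fields; Pre_ excludes exactly those.
def Pre_solution (forms : List (List String)) : Prop := ∀ f ∈ forms, 2 ≤ f.length
instance (forms : List (List String)) : Decidable (Pre_solution forms) := by
  unfold Pre_solution; infer_instance
def pvWitness_solution : List (List String) := [["1", "abcd"], ["2", "bcde"], ["3", "xy"]]
def Spec_solution (forms : List (List String)) (out : List String) : Prop := out = solution_alt forms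
instance (forms : List (List String)) (out : List String) : Decidable (Spec_solution forms out) := by
  unfold Spec_solution; infer_instance

-- ===== CLAIM (what is proved, stated in full; the proofs are below) =====
def Claim_equal_solution : Prop := ∀ (forms : List (List String)), Dom_solution forms → Pre_solution forms → Spec_solution forms (solution forms)


-- ===== LEMMAS AND PROOFS =====

-- canonical pieces of both programs
def pvBG (s : String) : List String :=
  (PySem.List.pyRange 0 (PySem.Str.len s - 1) 1).map
    (fun j => PySem.Str.slice s (some j) (some (j + 2)))

def pvNM (forms : List (List String)) : List String :=
  forms.map (fun i => PySem.List.pyGetD i 1 "")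

def pvDD (forms : List (List String)) : PySem.Dict String String :=
  forms.foldl (fun d i => d.insert (PySem.List.pyGetD i 1 "") (PySem.List.pyGetD i 0 ""))
    PySem.Dict.empty

def pvC (forms : List (List String)) : List (List String) := (pvNM forms).map pvBG

def pvHit (C : List (List String)) (i k : Int) : Prop :=
  ∃ j ∈ PySem.List.pyGetD C i [], j ∈ PySem.List.pyGetD C k []

-- A's outer-loop body
def pvStepA (C : List (List String)) (name : List String) (dd : PySem.Dict String String)
    (st : List String × List Int) (i : Int) : List String × List Int :=
  if PySem.List.pyGetD st.2 i 0 = 1 then st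
  else
    (PySem.List.pyRange (i + 1) (name.length : Int) 1).foldl (fun st k =>
      (PySem.List.pyGetD C i []).foldl (fun (st : List String × List Int) j =>
        if (PySem.List.pyGetD C k []).contains j then
          (st.1 ++ [dd.getD (PySem.List.pyGetD name i "") "",
                    dd.getD (PySem.List.pyGetD name k "") ""],
           PySem.List.pySetD (PySem.List.pySetD st.2 i 1) k 1)
        else st) st) st

-- B's outer-loop body
def pvStepB (bigs : List (List String)) (names : List String)
    (ids : PySem.Dict String String) (index : PySem.Dict String (List Int))
    (st : PySem.Set String × List Bool) (i : Int) : PySem.Set String × List Bool :=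
  if PySem.List.pyGetD st.2 i false = true then st
  else
    let mset : PySem.Set Int :=
      (PySem.List.pyGetD bigs i []).foldl (fun m b =>
        (index.getD b []).foldl (fun m k => if i < k then PySem.Set.add m k else m) m)
        PySem.Set.empty
    if mset = [] then st
    else
      mset.foldl (fun st k =>
        (PySem.Set.add st.1 (ids.getD (PySem.List.pyGetD names k "") ""),
         PySem.List.pySetD st.2 k true))
        (PySem.Set.add st.1 (ids.getD (PySem.List.pyGetD names i "") ""), st.2)

-- B's index dict
def pvIDX (forms : List (List String)) : PySem.Dict String (List Int) :=
  (PySem.List.pyRange 0 (((pvNM forms).length : Int)) 1).foldl (fun d i =>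
    (pvBG (PySem.List.pyGetD (pvNM forms) i "")).foldl
      (fun d b => d.modify b [] (fun l => l ++ [i])) d)
    PySem.Dict.empty

-- reading/writing a list cell at an in-range Int index
theorem pvGetSet {α : Type} (xs : List α) (i m : Int) (v d : α)
    (hi0 : 0 ≤ i) (hi : i < (xs.length : Int)) (hm0 : 0 ≤ m) (_hm : m < (xs.length : Int)) :
    PySem.List.pyGetD (PySem.List.pySetD xs i v) m d = if m = i then v else PySem.List.pyGetD xs m d := by
  have hi' : i = ((i.toNat : Nat) : Int) := (Int.toNat_of_nonneg hi0).symm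
  have hm' : m = ((m.toNat : Nat) : Int) := (Int.toNat_of_nonneg hm0).symm
  rw [hi', hm', PySem.List.pyGetD_pySetD_natCast _ _ _ _ _ (by omega)]
  by_cases h : m = i
  · simp [h]
  · have h' : ¬ (m.toNat = i.toNat) := by omega
    simp [h']
    intro hmax
    exact absurd (by omega : m = i) h

-- A, innermost loop (over comb[i])
theorem pvFoldA1 (cK : List String) (ai ak : String) (i k : Int)
    (hi0 : 0 ≤ i) (hk0 : 0 ≤ k) (js : List String) (ans : List String) (ch : List Int) :
    js.foldl (fun (st : List String × List Int) j =>
        if cK.contains j then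
          (st.1 ++ [ai, ak], PySem.List.pySetD (PySem.List.pySetD st.2 i 1) k 1)
        else st) (ans, ch)
    = (js.foldl (fun a j => if cK.contains j then a ++ [ai, ak] else a) ans,
       if ∃ j ∈ js, j ∈ cK then PySem.List.pySetD (PySem.List.pySetD ch i 1) k 1 else ch) := by
  have hidem : ∀ c : List Int,
      PySem.List.pySetD (PySem.List.pySetD (PySem.List.pySetD (PySem.List.pySetD c i 1) k 1) i 1) k 1
        = PySem.List.pySetD (PySem.List.pySetD c i 1) k 1 := by
    intro c
    simp only [PySem.List.pySetD_of_nonneg _ _ hi0, PySem.List.pySetD_of_nonneg _ _ hk0]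
    by_cases h : i.toNat = k.toNat
    · simp [h, List.set_set]
    · rw [List.set_comm 1 1 (by omega : k.toNat ≠ i.toNat), List.set_set, List.set_set]
  induction js generalizing ans ch with
  | nil => simp
  | cons j js ih =>
    by_cases hc : cK.contains j
    · have hjm : j ∈ cK := by simpa using hc
      simp only [List.foldl_cons, hc, if_pos]
      rw [ih]
      by_cases h2 : ∃ j' ∈ js, j' ∈ cK
      · simp [h2, hjm, hidem]
      · simp [h2, hjm]
    · have hjm : j ∉ cK := by simpa using hc
      simp only [List.foldl_cons, hc]
      rw [if_neg (by simp), if_neg (by simp), ih]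
      simp [hjm]

theorem pvMemA1 (cK : List String) (l : List String) (js : List String) (ans : List String)
    (x : String) :
    x ∈ js.foldl (fun a j => if cK.contains j then a ++ l else a) ans
      ↔ x ∈ ans ∨ ((∃ j ∈ js, j ∈ cK) ∧ x ∈ l) := by
  induction js generalizing ans with
  | nil => simp
  | cons j js ih =>
    by_cases hc : cK.contains j
    · have hjm : j ∈ cK := by simpa using hc
      simp only [List.foldl_cons, hc, if_pos, ih]
      simp [hjm]
      tauto
    · have hjm : j ∉ cK := by simpa using hc
      simp only [List.foldl_cons, hc]
      rw [if_neg (by simp)]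
      rw [ih]
      simp [hjm]

-- A, middle loop (over k)
theorem pvFoldA2 (C : List (List String)) (name : List String) (dd : PySem.Dict String String)
    (i : Int) (N : Nat) (hi0 : 0 ≤ i) (hiN : i < (N : Int))
    (ks : List Int) (hks : ∀ k ∈ ks, 0 ≤ k ∧ k < (N : Int)) :
    ∀ (ans : List String) (ch : List Int), ch.length = N →
    (∀ x, x ∈ (ks.foldl (fun st k =>
        (PySem.List.pyGetD C i []).foldl (fun (st : List String × List Int) j =>
          if (PySem.List.pyGetD C k []).contains j then
            (st.1 ++ [dd.getD (PySem.List.pyGetD name i "") "",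
                      dd.getD (PySem.List.pyGetD name k "") ""],
             PySem.List.pySetD (PySem.List.pySetD st.2 i 1) k 1)
          else st) st) (ans, ch)).1
      ↔ x ∈ ans ∨ ∃ k ∈ ks, pvHit C i k ∧
          (x = dd.getD (PySem.List.pyGetD name i "") "" ∨ x = dd.getD (PySem.List.pyGetD name k "") ""))
    ∧ (ks.foldl (fun st k =>
        (PySem.List.pyGetD C i []).foldl (fun (st : List String × List Int) j =>
          if (PySem.List.pyGetD C k []).contains j then
            (st.1 ++ [dd.getD (PySem.List.pyGetD name i "") "",
                      dd.getD (PySem.List.pyGetD name k "") ""],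
             PySem.List.pySetD (PySem.List.pySetD st.2 i 1) k 1)
          else st) st) (ans, ch)).2.length = N
    ∧ (∀ m : Int, 0 ≤ m → m < (N : Int) →
        (PySem.List.pyGetD (ks.foldl (fun st k =>
          (PySem.List.pyGetD C i []).foldl (fun (st : List String × List Int) j =>
            if (PySem.List.pyGetD C k []).contains j then
              (st.1 ++ [dd.getD (PySem.List.pyGetD name i "") "",
                        dd.getD (PySem.List.pyGetD name k "") ""],
               PySem.List.pySetD (PySem.List.pySetD st.2 i 1) k 1)
            else st) st) (ans, ch)).2 m 0 = 1
          ↔ (m = i ∧ ∃ k ∈ ks, pvHit C i k) ∨ (m ∈ ks ∧ pvHit C i m)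
              ∨ PySem.List.pyGetD ch m 0 = 1)) := by
  revert hks
  induction ks with
  | nil =>
    intro _ ans ch hch
    refine ⟨by simp, by simpa, ?_⟩
    intro m hm0 hmN; simp
  | cons k ks ih =>
    intro hks ans ch hch
    obtain ⟨hk0, hkN⟩ := hks k (by simp)
    have hks' : ∀ k' ∈ ks, 0 ≤ k' ∧ k' < (N : Int) := fun k' hk' => hks k' (by simp [hk'])
    simp only [List.foldl_cons]
    rw [pvFoldA1 _ _ _ i k hi0 hk0]
    by_cases hHit : pvHit C i k
    · rw [if_pos (show ∃ j ∈ PySem.List.pyGetD C i [], j ∈ PySem.List.pyGetD C k [] from hHit)]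
      have hch' : (PySem.List.pySetD (PySem.List.pySetD ch i 1) k 1).length = N := by
        simp [PySem.List.length_pySetD, hch]
      obtain ⟨iha, ihb, ihc⟩ := ih hks' _ _ hch'
      have hread : ∀ m : Int, 0 ≤ m → m < (N : Int) →
          (PySem.List.pyGetD (PySem.List.pySetD (PySem.List.pySetD ch i 1) k 1) m 0 = 1
            ↔ m = k ∨ m = i ∨ PySem.List.pyGetD ch m 0 = 1) := by
        intro m hm0 hmN
        rw [pvGetSet _ k m 1 0 hk0 (by rw [PySem.List.length_pySetD, hch]; exact hkN) hm0
              (by rw [PySem.List.length_pySetD, hch]; exact hmN)]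
        rw [pvGetSet ch i m 1 0 hi0 (by rw [hch]; exact hiN) hm0 (by rw [hch]; exact hmN)]
        split_ifs with h1 h2
        · simp [h1]
        · simp [h2]
        · simp [h1, h2]
      refine ⟨?_, ihb, ?_⟩
      · intro x
        rw [iha x, pvMemA1]
        simp only [List.mem_cons, List.not_mem_nil, or_false]
        have hHit' : ∃ j ∈ PySem.List.pyGetD C i [], j ∈ PySem.List.pyGetD C k [] := hHit
        constructor
        · rintro ((hx | ⟨-, hx⟩) | ⟨k', hk', hH, hx⟩)
          · exact Or.inl hx
          · exact Or.inr ⟨k, Or.inl rfl, hHit, hx⟩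
          · exact Or.inr ⟨k', Or.inr hk', hH, hx⟩
        · rintro (hx | ⟨k', (rfl | hk'), hH, hx⟩)
          · exact Or.inl (Or.inl hx)
          · exact Or.inl (Or.inr ⟨hHit', hx⟩)
          · exact Or.inr ⟨k', hk', hH, hx⟩
      · intro m hm0 hmN
        rw [ihc m hm0 hmN, hread m hm0 hmN]
        simp only [List.mem_cons]
        constructor
        · rintro (⟨rfl, k', hk', hH⟩ | ⟨hm, hH⟩ | rfl | rfl | hold)
          · exact Or.inl ⟨rfl, k', Or.inr hk', hH⟩
          · exact Or.inr (Or.inl ⟨Or.inr hm, hH⟩)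
          · exact Or.inr (Or.inl ⟨Or.inl rfl, hHit⟩)
          · exact Or.inl ⟨rfl, k, Or.inl rfl, hHit⟩
          · exact Or.inr (Or.inr hold)
        · rintro (⟨rfl, k', (rfl | hk'), hH⟩ | ⟨hm | hm, hH⟩ | hold)
          · exact Or.inr (Or.inr (Or.inr (Or.inl rfl)))
          · exact Or.inl ⟨rfl, k', hk', hH⟩
          · exact Or.inr (Or.inr (Or.inl hm))
          · exact Or.inr (Or.inl ⟨hm, hH⟩)
          · exact Or.inr (Or.inr (Or.inr (Or.inr hold)))
    · rw [if_neg (show ¬ ∃ j ∈ PySem.List.pyGetD C i [], j ∈ PySem.List.pyGetD C k [] from hHit)]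
      obtain ⟨iha, ihb, ihc⟩ := ih hks' _ ch hch
      refine ⟨?_, ihb, ?_⟩
      · intro x
        rw [iha x, pvMemA1]
        simp only [List.mem_cons, List.not_mem_nil, or_false]
        constructor
        · rintro ((hx | ⟨hH, -⟩) | ⟨k', hk', hH, hx⟩)
          · exact Or.inl hx
          · exact absurd hH hHit
          · exact Or.inr ⟨k', Or.inr hk', hH, hx⟩
        · rintro (hx | ⟨k', (rfl | hk'), hH, hx⟩)
          · exact Or.inl (Or.inl hx)
          · exact absurd hH hHit
          · exact Or.inr ⟨k', hk', hH, hx⟩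
      · intro m hm0 hmN
        rw [ihc m hm0 hmN]
        simp only [List.mem_cons]
        constructor
        · rintro (⟨rfl, k', hk', hH⟩ | ⟨hm, hH⟩ | hold)
          · exact Or.inl ⟨rfl, k', Or.inr hk', hH⟩
          · exact Or.inr (Or.inl ⟨Or.inr hm, hH⟩)
          · exact Or.inr (Or.inr hold)
        · rintro (⟨rfl, k', (rfl | hk'), hH⟩ | ⟨hm | hm, hH⟩ | hold)
          · exact absurd hH hHit
          · exact Or.inl ⟨rfl, k', hk', hH⟩
          · exact absurd (hm ▸ hH) hHit
          · exact Or.inr (Or.inl ⟨hm, hH⟩)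
          · exact Or.inr (Or.inr hold)

-- B, the index dict: inner fold over one bigram list
theorem pvIdxInner (bs : List String) (d : PySem.Dict String (List Int)) (i : Int)
    (b : String) (k : Int) :
    k ∈ (bs.foldl (fun d b => d.modify b [] (fun l => l ++ [i])) d).getD b []
      ↔ k ∈ d.getD b [] ∨ (b ∈ bs ∧ k = i) := by
  induction bs generalizing d with
  | nil => simp
  | cons b0 bs ih =>
    simp only [List.foldl_cons, ih]
    by_cases hb : b = b0
    · subst hb
      rw [PySem.Dict.getD_modify_self]
      simp
      tauto
    · rw [PySem.Dict.getD_modify_of_ne _ _ _ hb]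
      simp [hb]

theorem pvIdxOuter (g : Int → List String) (L : List Int) (d : PySem.Dict String (List Int))
    (b : String) (k : Int) :
    k ∈ (L.foldl (fun d i => (g i).foldl (fun d b => d.modify b [] (fun l => l ++ [i])) d) d).getD b []
      ↔ k ∈ d.getD b [] ∨ ∃ i ∈ L, b ∈ g i ∧ k = i := by
  induction L generalizing d with
  | nil => simp
  | cons i0 L ih =>
    simp only [List.foldl_cons, ih, pvIdxInner]
    simp only [List.mem_cons]
    constructor
    · rintro ((hk | ⟨hb, hki⟩) | ⟨i', hi', hb, hki⟩)
      · exact Or.inl hk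
      · exact Or.inr ⟨i0, Or.inl rfl, hb, hki⟩
      · exact Or.inr ⟨i', Or.inr hi', hb, hki⟩
    · rintro (hk | ⟨i', hii | hi', hb, hki⟩)
      · exact Or.inl (Or.inl hk)
      · exact Or.inl (Or.inr ⟨hii ▸ hb, hki.trans hii⟩)
      · exact Or.inr ⟨i', hi', hb, hki⟩

theorem pvIdxMem (forms : List (List String)) (b : String) (k : Int) :
    k ∈ (pvIDX forms).getD b []
      ↔ 0 ≤ k ∧ k < ((pvNM forms).length : Int) ∧ b ∈ pvBG (PySem.List.pyGetD (pvNM forms) k "") := by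
  unfold pvIDX
  rw [pvIdxOuter (fun i => pvBG (PySem.List.pyGetD (pvNM forms) i ""))]
  simp only [PySem.Dict.getD_empty, List.not_mem_nil, false_or, PySem.List.mem_pyRange_one]
  constructor
  · rintro ⟨i, ⟨hi0, hiN⟩, hb, rfl⟩
    exact ⟨hi0, hiN, hb⟩
  · rintro ⟨hk0, hkN, hb⟩
    exact ⟨k, ⟨hk0, hkN⟩, hb, rfl⟩

-- B, the match-set comprehension
theorem pvMsetInner (i : Int) (ks : List Int) (m0 : PySem.Set Int) (k : Int) :
    k ∈ ks.foldl (fun m k' => if i < k' then PySem.Set.add m k' else m) m0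
      ↔ k ∈ m0 ∨ (k ∈ ks ∧ i < k) := by
  induction ks generalizing m0 with
  | nil => simp
  | cons k0 ks ih =>
    simp only [List.foldl_cons]
    by_cases hik : i < k0
    · rw [if_pos hik]
      rw [ih]
      simp only [PySem.Set.mem_add, List.mem_cons]
      constructor
      · rintro ((hk | rfl) | ⟨hk, hlt⟩)
        · exact Or.inl hk
        · exact Or.inr ⟨Or.inl rfl, hik⟩
        · exact Or.inr ⟨Or.inr hk, hlt⟩
      · rintro (hk | ⟨rfl | hk, hlt⟩)
        · exact Or.inl (Or.inl hk)
        · exact Or.inl (Or.inr rfl)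
        · exact Or.inr ⟨hk, hlt⟩
    · rw [if_neg hik, ih]
      simp only [List.mem_cons]
      constructor
      · rintro (hk | ⟨hk, hlt⟩)
        · exact Or.inl hk
        · exact Or.inr ⟨Or.inr hk, hlt⟩
      · rintro (hk | ⟨rfl | hk, hlt⟩)
        · exact Or.inl hk
        · exact absurd hlt hik
        · exact Or.inr ⟨hk, hlt⟩

theorem pvMsetMem (index : PySem.Dict String (List Int)) (i : Int) (bsI : List String)
    (m0 : PySem.Set Int) (k : Int) :
    k ∈ bsI.foldl (fun m b =>
        (index.getD b []).foldl (fun m k' => if i < k' then PySem.Set.add m k' else m) m) m0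
      ↔ k ∈ m0 ∨ ∃ b ∈ bsI, k ∈ index.getD b [] ∧ i < k := by
  induction bsI generalizing m0 with
  | nil => simp
  | cons b0 bs ih =>
    simp only [List.foldl_cons, ih, pvMsetInner]
    simp only [List.mem_cons]
    constructor
    · rintro ((hk | ⟨hk, hlt⟩) | ⟨b, hb, hk, hlt⟩)
      · exact Or.inl hk
      · exact Or.inr ⟨b0, Or.inl rfl, hk, hlt⟩
      · exact Or.inr ⟨b, Or.inr hb, hk, hlt⟩
    · rintro (hk | ⟨b, (rfl | hb), hk, hlt⟩)
      · exact Or.inl (Or.inl hk)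
      · exact Or.inl (Or.inr ⟨hk, hlt⟩)
      · exact Or.inr ⟨b, hb, hk, hlt⟩

-- B, the marking loop over the match set
theorem pvFoldB3 (names : List String) (ids : PySem.Dict String String) (N : Nat)
    (ms : List Int) (hms : ∀ k ∈ ms, 0 ≤ k ∧ k < (N : Int)) :
    ∀ (res : PySem.Set String) (mk : List Bool), mk.length = N →
    (∀ x, x ∈ (ms.foldl (fun (st : PySem.Set String × List Bool) k =>
          (PySem.Set.add st.1 (ids.getD (PySem.List.pyGetD names k "") ""),
           PySem.List.pySetD st.2 k true)) (res, mk)).1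
        ↔ x ∈ res ∨ ∃ k ∈ ms, x = ids.getD (PySem.List.pyGetD names k "") "")
    ∧ (ms.foldl (fun (st : PySem.Set String × List Bool) k =>
          (PySem.Set.add st.1 (ids.getD (PySem.List.pyGetD names k "") ""),
           PySem.List.pySetD st.2 k true)) (res, mk)).2.length = N
    ∧ (∀ m : Int, 0 ≤ m → m < (N : Int) →
        (PySem.List.pyGetD (ms.foldl (fun (st : PySem.Set String × List Bool) k =>
          (PySem.Set.add st.1 (ids.getD (PySem.List.pyGetD names k "") ""),
           PySem.List.pySetD st.2 k true)) (res, mk)).2 m false = true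
          ↔ m ∈ ms ∨ PySem.List.pyGetD mk m false = true))
    ∧ (res.Nodup → (ms.foldl (fun (st : PySem.Set String × List Bool) k =>
          (PySem.Set.add st.1 (ids.getD (PySem.List.pyGetD names k "") ""),
           PySem.List.pySetD st.2 k true)) (res, mk)).1.Nodup) := by
  revert hms
  induction ms with
  | nil =>
    intro _ res mk hmk
    refine ⟨by simp, by simpa, ?_, fun h => h⟩
    intro m hm0 hmN; simp
  | cons k ms ih =>
    intro hms res mk hmk
    obtain ⟨hk0, hkN⟩ := hms k (by simp)
    have hms' : ∀ k' ∈ ms, 0 ≤ k' ∧ k' < (N : Int) := fun k' hk' => hms k' (by simp [hk'])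
    simp only [List.foldl_cons]
    have hmk' : (PySem.List.pySetD mk k true).length = N := by
      rw [PySem.List.length_pySetD]; exact hmk
    obtain ⟨iha, ihb, ihc, ihd⟩ := ih hms' (PySem.Set.add res (ids.getD (PySem.List.pyGetD names k "") "")) _ hmk'
    refine ⟨?_, ihb, ?_, ?_⟩
    · intro x
      rw [iha x]
      simp only [PySem.Set.mem_add, List.mem_cons]
      constructor
      · rintro ((hx | rfl) | ⟨k', hk', rfl⟩)
        · exact Or.inl hx
        · exact Or.inr ⟨k, Or.inl rfl, rfl⟩
        · exact Or.inr ⟨k', Or.inr hk', rfl⟩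
      · rintro (hx | ⟨k', (rfl | hk'), rfl⟩)
        · exact Or.inl (Or.inl hx)
        · exact Or.inl (Or.inr rfl)
        · exact Or.inr ⟨k', hk', rfl⟩
    · intro m hm0 hmN
      rw [ihc m hm0 hmN]
      rw [pvGetSet mk k m true false hk0 (by rw [hmk]; exact hkN) hm0 (by rw [hmk]; exact hmN)]
      simp only [List.mem_cons]
      by_cases hmkk : m = k
      · simp [hmkk]
      · simp [hmkk]
    · intro hnd
      exact ihd (PySem.Set.nodup_add _ _ hnd)

-- the joint invariant of the two main loops
def pvInv (N : Nat) (t : Int) (sA : List String × List Int) (sB : PySem.Set String × List Bool) : Prop :=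
  sA.2.length = N ∧ sB.2.length = N ∧ sB.1.Nodup ∧
  (∀ x, x ∈ sA.1 ↔ x ∈ sB.1) ∧
  (∀ m : Int, t ≤ m → 0 ≤ m → m < (N : Int) →
    (PySem.List.pyGetD sA.2 m 0 = 1 ↔ PySem.List.pyGetD sB.2 m false = true))

theorem pvCGet (forms : List (List String)) (k : Int) (hk0 : 0 ≤ k)
    (hkN : k < ((pvNM forms).length : Int)) :
    PySem.List.pyGetD (pvC forms) k [] = pvBG (PySem.List.pyGetD (pvNM forms) k "") := by
  have hlen : (pvC forms).length = (pvNM forms).length := by simp [pvC]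
  rw [PySem.List.pyGetD_eq_getElem _ _ hk0 (by rw [hlen]; exact hkN),
      PySem.List.pyGetD_eq_getElem _ _ hk0 hkN]
  simp [pvC]

theorem pvStepEquiv (forms : List (List String)) (i : Int)
    (hi0 : 0 ≤ i) (hiN : i < ((pvNM forms).length : Int))
    (sA : List String × List Int) (sB : PySem.Set String × List Bool)
    (h : pvInv (pvNM forms).length i sA sB) :
    pvInv (pvNM forms).length (i + 1)
      (pvStepA (pvC forms) (pvNM forms) (pvDD forms) sA i)
      (pvStepB (pvC forms) (pvNM forms) (pvDD forms) (pvIDX forms) sB i) := by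
  obtain ⟨hlA, hlB, hnd, hmem, hmarks⟩ := h
  have hg := hmarks i le_rfl hi0 hiN
  unfold pvStepA pvStepB
  by_cases hskip : PySem.List.pyGetD sA.2 i 0 = 1
  · rw [if_pos hskip, if_pos (hg.mp hskip)]
    exact ⟨hlA, hlB, hnd, hmem, fun m hm hm0 hmN => hmarks m (by omega) hm0 hmN⟩
  · have hskipB : ¬ PySem.List.pyGetD sB.2 i false = true := fun hb => hskip (hg.mpr hb)
    rw [if_neg hskip, if_neg hskipB]
    have hks : ∀ k ∈ PySem.List.pyRange (i + 1) (((pvNM forms).length : Int)) 1,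
        0 ≤ k ∧ k < (((pvNM forms).length : Nat) : Int) := by
      intro k hk
      rw [PySem.List.mem_pyRange_one] at hk
      omega
    obtain ⟨fa, fb, fc⟩ := pvFoldA2 (pvC forms) (pvNM forms) (pvDD forms) i
      (pvNM forms).length hi0 hiN _ hks sA.1 sA.2 hlA
    have hmm : ∀ k : Int,
        (k ∈ (PySem.List.pyGetD (pvC forms) i []).foldl (fun m b =>
          ((pvIDX forms).getD b []).foldl (fun m k => if i < k then PySem.Set.add m k else m) m)
          PySem.Set.empty)
        ↔ (i < k ∧ k < ((pvNM forms).length : Int) ∧ pvHit (pvC forms) i k) := by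
      intro k
      rw [pvMsetMem]
      simp only [PySem.Set.empty, List.not_mem_nil, false_or]
      constructor
      · rintro ⟨b, hb, hidx, hik⟩
        rw [pvIdxMem] at hidx
        obtain ⟨hk0, hkN, hbk⟩ := hidx
        rw [← pvCGet forms k hk0 hkN] at hbk
        exact ⟨hik, hkN, b, hb, hbk⟩
      · rintro ⟨hik, hkN, b, hb, hbk⟩
        refine ⟨b, hb, ?_, hik⟩
        rw [pvIdxMem]
        rw [pvCGet forms k (by omega) hkN] at hbk
        exact ⟨by omega, hkN, hbk⟩
    by_cases hms : (PySem.List.pyGetD (pvC forms) i []).foldl (fun m b =>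
          ((pvIDX forms).getD b []).foldl (fun m k => if i < k then PySem.Set.add m k else m) m)
          PySem.Set.empty = []
    · rw [if_pos hms]
      have hnone : ¬ ∃ k ∈ PySem.List.pyRange (i + 1) (((pvNM forms).length : Int)) 1,
          pvHit (pvC forms) i k := by
        rintro ⟨k, hk, hH⟩
        rw [PySem.List.mem_pyRange_one] at hk
        have : k ∈ ([] : List Int) := hms ▸ (hmm k).mpr ⟨by omega, hk.2, hH⟩
        simp at this
      refine ⟨fb, hlB, hnd, ?_, ?_⟩
      · intro x
        rw [fa x]
        constructor
        · rintro (hx | ⟨k, hk, hH, -⟩)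
          · exact (hmem x).mp hx
          · exact absurd ⟨k, hk, hH⟩ hnone
        · intro hx
          exact Or.inl ((hmem x).mpr hx)
      · intro m hm hm0 hmN
        rw [fc m hm0 hmN]
        have hmi : ¬ m = i := by omega
        have hmH : ¬ (m ∈ PySem.List.pyRange (i + 1) (((pvNM forms).length : Int)) 1
            ∧ pvHit (pvC forms) i m) := by
          rintro ⟨hmk, hH⟩
          exact hnone ⟨m, hmk, hH⟩
        rw [← hmarks m (by omega) hm0 hmN]
        tauto
    · rw [if_neg hms]
      have hmsB : ∀ k ∈ (PySem.List.pyGetD (pvC forms) i []).foldl (fun m b =>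
          ((pvIDX forms).getD b []).foldl (fun m k => if i < k then PySem.Set.add m k else m) m)
          PySem.Set.empty, 0 ≤ k ∧ k < (((pvNM forms).length : Nat) : Int) := by
        intro k hk
        obtain ⟨hik, hkN, -⟩ := (hmm k).mp hk
        exact ⟨by omega, hkN⟩
      obtain ⟨ga, gb, gc, gd⟩ := pvFoldB3 (pvNM forms) (pvDD forms) (pvNM forms).length _ hmsB
        (PySem.Set.add sB.1 ((pvDD forms).getD (PySem.List.pyGetD (pvNM forms) i "") "")) sB.2 hlB
      have hitAny : ∃ k ∈ PySem.List.pyRange (i + 1) (((pvNM forms).length : Int)) 1,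
          pvHit (pvC forms) i k := by
        obtain ⟨k, hk⟩ := List.exists_mem_of_ne_nil _ hms
        obtain ⟨hik, hkN, hH⟩ := (hmm k).mp hk
        exact ⟨k, by rw [PySem.List.mem_pyRange_one]; omega, hH⟩
      refine ⟨fb, gb, gd (PySem.Set.nodup_add _ _ hnd), ?_, ?_⟩
      · intro x
        rw [fa x, ga x]
        simp only [PySem.Set.mem_add]
        constructor
        · rintro (hx | ⟨k, hk, hH, hx | hx⟩)
          · exact Or.inl (Or.inl ((hmem x).mp hx))
          · exact Or.inl (Or.inr hx)
          · rw [PySem.List.mem_pyRange_one] at hk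
            exact Or.inr ⟨k, (hmm k).mpr ⟨by omega, hk.2, hH⟩, hx⟩
        · rintro ((hx | hx) | ⟨k, hk, hx⟩)
          · exact Or.inl ((hmem x).mpr hx)
          · obtain ⟨k0, hk0, hH0⟩ := hitAny
            exact Or.inr ⟨k0, hk0, hH0, Or.inl hx⟩
          · obtain ⟨hik, hkN, hH⟩ := (hmm k).mp hk
            exact Or.inr ⟨k, by rw [PySem.List.mem_pyRange_one]; omega, hH, Or.inr hx⟩
      · intro m hm hm0 hmN
        rw [fc m hm0 hmN, gc m hm0 hmN]
        have hmi : ¬ m = i := by omega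
        have hmks : m ∈ PySem.List.pyRange (i + 1) (((pvNM forms).length : Int)) 1 := by
          rw [PySem.List.mem_pyRange_one]; omega
        have hmset : (m ∈ (PySem.List.pyGetD (pvC forms) i []).foldl (fun m b =>
            ((pvIDX forms).getD b []).foldl (fun m k => if i < k then PySem.Set.add m k else m) m)
            PySem.Set.empty) ↔ pvHit (pvC forms) i m := by
          rw [hmm m]
          constructor
          · rintro ⟨-, -, hH⟩; exact hH
          · intro hH; exact ⟨by omega, by omega, hH⟩
        rw [hmset, ← hmarks m (by omega) hm0 hmN]
        tauto

theorem pvLoopEquiv (forms : List (List String)) :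
    ∀ (t : Int) (sA : List String × List Int) (sB : PySem.Set String × List Bool),
    0 ≤ t → pvInv (pvNM forms).length t sA sB →
    pvInv (pvNM forms).length ((pvNM forms).length : Int)
      ((PySem.List.pyRange t ((pvNM forms).length : Int) 1).foldl
        (pvStepA (pvC forms) (pvNM forms) (pvDD forms)) sA)
      ((PySem.List.pyRange t ((pvNM forms).length : Int) 1).foldl
        (pvStepB (pvC forms) (pvNM forms) (pvDD forms) (pvIDX forms)) sB) := by
  suffices H : ∀ (d : Nat) (t : Int) (sA : List String × List Int) (sB : PySem.Set String × List Bool),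
      ((((pvNM forms).length : Int)) - t).toNat = d → 0 ≤ t →
      pvInv (pvNM forms).length t sA sB →
      pvInv (pvNM forms).length ((pvNM forms).length : Int)
        ((PySem.List.pyRange t ((pvNM forms).length : Int) 1).foldl
          (pvStepA (pvC forms) (pvNM forms) (pvDD forms)) sA)
        ((PySem.List.pyRange t ((pvNM forms).length : Int) 1).foldl
          (pvStepB (pvC forms) (pvNM forms) (pvDD forms) (pvIDX forms)) sB) by
    intro t sA sB ht0 hinv
    exact H _ t sA sB rfl ht0 hinv
  intro d
  induction d with
  | zero =>
    intro t sA sB hd ht0 hinv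
    rw [PySem.List.pyRange_one_eq_nil (by omega)]
    simp only [List.foldl_nil]
    obtain ⟨h1, h2, h3, h4, h5⟩ := hinv
    exact ⟨h1, h2, h3, h4, fun m hm hm0 hmN => h5 m (by omega) hm0 hmN⟩
  | succ d ih =>
    intro t sA sB hd ht0 hinv
    have hlt : t < ((pvNM forms).length : Int) := by omega
    rw [PySem.List.pyRange_one_cons hlt]
    simp only [List.foldl_cons]
    exact ih (t + 1) _ _ (by omega) (by omega) (pvStepEquiv forms t ht0 hlt sA sB hinv)

-- the two ports, rewritten through the canonical pieces
theorem pvSolutionA (forms : List (List String)) :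
    solution forms = PySem.List.sorted (PySem.Set.ofList
      (((PySem.List.pyRange 0 (((pvNM forms).length : Int)) 1).foldl
        (pvStepA (pvC forms) (pvNM forms) (pvDD forms))
        ([], (PySem.List.pyRange 0 (((pvNM forms).length : Int)) 1).map (fun _ => 0))).1))
      (fun x => x) false := by
  simp only [solution, pvC, pvNM, pvDD]
  rw [PySem.List.foldl_append_singleton_eq_map]
  simp only [List.nil_append]
  rfl


theorem pvSolutionB (forms : List (List String)) :
    solution_alt forms = PySem.List.sorted
      (((PySem.List.pyRange 0 (((pvNM forms).length : Int)) 1).foldl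
        (pvStepB (pvC forms) (pvNM forms) (pvDD forms) (pvIDX forms))
        (PySem.Set.empty, List.replicate (pvNM forms).length false)).1)
      (fun x => x) false := by
  simp only [solution_alt]
  rw [PySem.List.foldl_prod_mk (f := fun (a : List String) f => a ++ [PySem.List.pyGetD f 1 ""])
      (g := fun (d : PySem.Dict String String) f =>
        d.insert (PySem.List.pyGetD f 1 "") (PySem.List.pyGetD f 0 ""))]
  simp only [PySem.List.foldl_append_singleton_eq_map (f := fun f => PySem.List.pyGetD f 1 ""),
    List.nil_append]
  rw [show List.map (fun i => PySem.List.pyGetD i 1 "") forms = pvNM forms from rfl,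
      show List.foldl (fun (d : PySem.Dict String String) i =>
        d.insert (PySem.List.pyGetD i 1 "") (PySem.List.pyGetD i 0 ""))
        PySem.Dict.empty forms = pvDD forms from rfl]
  rw [PySem.List.foldl_prod_mk
      (f := fun (a : List (List String)) (i : Int) =>
        a ++ [(PySem.List.pyRange 0 (PySem.Str.len (PySem.List.pyGetD (pvNM forms) i "") - 1) 1).map
          (fun j => PySem.Str.slice (PySem.List.pyGetD (pvNM forms) i "") (some j) (some (j + 2)))])
      (g := fun (d : PySem.Dict String (List Int)) (i : Int) =>
        ((PySem.List.pyRange 0 (PySem.Str.len (PySem.List.pyGetD (pvNM forms) i "") - 1) 1).map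
          (fun j => PySem.Str.slice (PySem.List.pyGetD (pvNM forms) i "") (some j) (some (j + 2)))).foldl
          (fun d b => d.modify b [] (fun l => l ++ [i])) d)]
  rw [PySem.List.foldl_append_singleton_eq_map
      (f := fun (i : Int) =>
        (PySem.List.pyRange 0 (PySem.Str.len (PySem.List.pyGetD (pvNM forms) i "") - 1) 1).map
          (fun j => PySem.Str.slice (PySem.List.pyGetD (pvNM forms) i "") (some j) (some (j + 2))))]
  simp only [List.nil_append]
  rw [show (fun (i : Int) =>
        (PySem.List.pyRange 0 (PySem.Str.len (PySem.List.pyGetD (pvNM forms) i "") - 1) 1).map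
          (fun j => PySem.Str.slice (PySem.List.pyGetD (pvNM forms) i "") (some j) (some (j + 2))))
      = pvBG ∘ (fun i => PySem.List.pyGetD (pvNM forms) i "") from rfl]
  rw [← List.map_map, PySem.List.map_pyGetD_pyRange_zero']
  rw [show ((PySem.List.pyRange 0 ((pvNM forms).length : Int) 1).foldl (fun d i =>
        (List.map (fun j => PySem.Str.slice (PySem.List.pyGetD (pvNM forms) i "") (some j) (some (j + 2)))
          (PySem.List.pyRange 0 (PySem.Str.len (PySem.List.pyGetD (pvNM forms) i "") - 1) 1)).foldl
          (fun d b => d.modify b [] (fun l => l ++ [i])) d) PySem.Dict.empty) = pvIDX forms from rfl]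
  rw [Int.toNat_natCast]
  rfl



-- ===== VERDICT (by name: the statement is the Claim_ definition above) =====
theorem solution_spec : Claim_equal_solution := by
  intro forms _ _
  unfold Spec_solution
  rw [pvSolutionA, pvSolutionB]
  have hinv : pvInv (pvNM forms).length 0
      ([], (PySem.List.pyRange 0 (((pvNM forms).length : Int)) 1).map (fun _ => 0))
      (PySem.Set.empty, List.replicate (pvNM forms).length false) := by
    refine ⟨by simp [PySem.List.length_pyRange_one], by simp, by simp [PySem.Set.empty], by simp [PySem.Set.empty], ?_⟩
    intro m _ hm0 hmN
    rw [PySem.List.pyGetD_map_pyRange_of_nonneg _ _ _ _ hm0 hmN]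
    rw [PySem.List.pyGetD_of_nonneg _ _ hm0]
    simp
  have h := pvLoopEquiv forms 0 _ _ le_rfl hinv
  obtain ⟨-, -, hnd, hmem, -⟩ := h
  apply PySem.List.sorted_eq_sorted_of_perm _ _ _ Function.injective_id
  rw [List.perm_ext_iff_of_nodup (PySem.Set.nodup_ofList _) hnd]
  intro a
  rw [PySem.Set.mem_ofList]
  exact hmem a
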